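-- pv_equiv track=rewrite | github.com/ansible/ansible | lib/ansible/modules/network/nxos/storage/nxos_devicealias.py | isPwwnValid
-- ===== SOURCE A (Python) =====
-- import string
--
-- def isPwwnValid(pwwn):
--     pwwnsplit = pwwn.split(":")
--     if len(pwwnsplit) != 8:
--         return False
--     for eachpwwnsplit in pwwnsplit:
--         if len(eachpwwnsplit) > 2 or len(eachpwwnsplit) < 1:
--             return False
--         if not all(c in string.hexdigits for c in eachpwwnsplit):
--             return False
--     return True
-- ===== SOURCE B (Python) =====
-- def isPwwnValid(pwwn):
--     # single left-to-right scan (state machine): no split, no nested loop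
--     groups = 1
--     run = 0
--     for c in pwwn:
--         if c == ':':
--             if run == 0:
--                 return False
--             groups += 1
--             run = 0
--         elif c in "0123456789abcdefABCDEF":
--             run += 1
--             if run > 2:
--                 return False
--         else:
--             return False
--     return groups == 8 and run >= 1
-- ===== Notes on version B (the rewrite author's own statement) =====
-- stated objective: alternative
-- what changed: Replaced split-on-colon-then-validate-each-part with a single left-to-right character scan that tracks the group count and the current hex-run length, so no intermediate list of parts is built.
import Mathlib
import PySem

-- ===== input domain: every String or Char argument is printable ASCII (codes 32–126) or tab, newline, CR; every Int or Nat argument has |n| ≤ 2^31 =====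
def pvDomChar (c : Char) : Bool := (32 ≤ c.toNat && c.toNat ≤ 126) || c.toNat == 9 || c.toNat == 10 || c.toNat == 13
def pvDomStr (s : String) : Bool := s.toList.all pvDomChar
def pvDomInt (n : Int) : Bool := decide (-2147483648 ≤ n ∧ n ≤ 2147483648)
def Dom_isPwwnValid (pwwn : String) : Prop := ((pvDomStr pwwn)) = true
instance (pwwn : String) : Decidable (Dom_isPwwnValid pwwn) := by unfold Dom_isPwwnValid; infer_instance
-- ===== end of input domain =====

-- B replaces A's split-into-8-parts-then-check-each-part with a single left-to-right
-- character scan that tracks the group count and the current run length (objective: alternative).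

-- string.hexdigits
def pvHexdigits : List Char := "0123456789abcdefABCDEF".toList

-- ===== PORT A =====
-- the for-loop over the split parts, with its early returns
def pvALoop : List String → Bool
  | [] => true
  | p :: rest =>
    if PySem.Str.len p > 2 || PySem.Str.len p < 1 then false
    else if !(p.toList.all (fun c => pvHexdigits.contains c)) then false
    else pvALoop rest

def isPwwnValid (pwwn : String) : Bool :=
  match PySem.Str.split? pwwn ":" with
  | none => false      -- unreachable: the separator ":" is non-empty
  | some pwwnsplit =>
    if pwwnsplit.length ≠ 8 then false
    else pvALoop pwwnsplit

-- ===== PORT B =====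
-- the scan of Source B: groups = colon count + 1, run = hex digits in the current group
def pvBLoop : List Char → Nat → Nat → Bool
  | [], groups, run => groups == 8 && decide (1 ≤ run)
  | c :: cs, groups, run =>
    if c = ':' then
      if run = 0 then false else pvBLoop cs (groups + 1) 0
    else if pvHexdigits.contains c then
      if run + 1 > 2 then false else pvBLoop cs groups (run + 1)
    else false

def isPwwnValid_alt (pwwn : String) : Bool := pvBLoop pwwn.toList 1 0

-- ===== PRECONDITION & SPEC =====
def Spec_isPwwnValid (pwwn : String) (out : Bool) : Prop := out = isPwwnValid_alt pwwn
instance (pwwn : String) (out : Bool) : Decidable (Spec_isPwwnValid pwwn out) := by unfold Spec_isPwwnValid; infer_instance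

-- ===== CLAIM (what is proved, stated in full; the proofs are below) =====
def Claim_equal_isPwwnValid : Prop := ∀ (pwwn : String), Dom_isPwwnValid pwwn → Spec_isPwwnValid pwwn (isPwwnValid pwwn)

-- ===== LEMMAS AND PROOFS =====

-- reference splitter: what l.split(':') produces, structurally on the char list
def pvSplit : List Char → List (List Char)
  | [] => [[]]
  | c :: cs => if c = ':' then [] :: pvSplit cs
               else (c :: (pvSplit cs).headI) :: (pvSplit cs).tail

lemma pvHeadI_cons {a : List Char} {l : List (List Char)} : (a :: l).headI = a := rfl

lemma pvSplit_exists_cons (l : List Char) : ∃ p t, pvSplit l = p :: t := by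
  cases l with
  | nil => exact ⟨[], [], rfl⟩
  | cons c cs =>
    by_cases hc : c = ':'
    · exact ⟨[], pvSplit cs, by simp [pvSplit, hc]⟩
    · exact ⟨c :: (pvSplit cs).headI, (pvSplit cs).tail, by simp [pvSplit, hc]⟩

lemma pvSplit_cons_headI_tail (l : List Char) :
    (pvSplit l).headI :: (pvSplit l).tail = pvSplit l := by
  obtain ⟨p, t, h⟩ := pvSplit_exists_cons l
  rw [h]
  rfl

lemma go_eq (fuel : Nat) : ∀ (l cur : List Char) (acc : List (List Char)),
    l.length ≤ fuel →
    PySem.Chars.splitOn.go [':'] fuel l cur acc =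
      acc.reverse ++ (cur.reverse ++ (pvSplit l).headI) :: (pvSplit l).tail := by
  induction fuel with
  | zero =>
    intro l cur acc h
    have hl : l = [] := by
      cases l with
      | nil => rfl
      | cons a t => simp at h
    subst hl
    simp [PySem.Chars.splitOn.go, pvSplit]
  | succ fuel ih =>
    intro l cur acc h
    cases l with
    | nil => simp [PySem.Chars.splitOn.go, pvSplit]
    | cons c cs =>
      by_cases hc : c = ':'
      · subst hc
        have hpre : List.isPrefixOf [':'] (':' :: cs) = true := by
          simp [List.isPrefixOf]
        rw [PySem.Chars.splitOn.go]
        simp only [hpre, if_pos]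
        have hih := ih cs [] ((cur.reverse) :: acc) (by simpa using Nat.le_of_succ_le_succ h)
        simp only [List.length_singleton, List.drop_succ_cons, List.drop_zero] at *
        rw [hih]
        simp [pvSplit, pvSplit_cons_headI_tail]
      · have hpre : List.isPrefixOf [':'] (c :: cs) = false := by
          simp [List.isPrefixOf]
          intro h'
          exact hc h'.symm
        rw [PySem.Chars.splitOn.go]
        simp only [hpre, Bool.false_eq_true, if_false]
        have hih := ih cs (c :: cur) acc (by simpa using Nat.le_of_succ_le_succ h)
        rw [hih]
        simp [pvSplit, hc]

lemma splitOn_eq (l : List Char) : PySem.Chars.splitOn l [':'] = pvSplit l := by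
  have h := go_eq (l.length + 1) l [] [] (by omega)
  rw [PySem.Chars.splitOn] at *
  simp only [List.reverse_nil, List.nil_append] at h
  rw [h]
  exact pvSplit_cons_headI_tail l

-- the per-part check both programs perform
def pvOk (p : List Char) : Bool :=
  decide (1 ≤ p.length) && decide (p.length ≤ 2) && p.all (fun c => pvHexdigits.contains c)

lemma aLoop_eq (ps : List String) : pvALoop ps = ps.all (fun p => pvOk p.toList) := by
  induction ps with
  | nil => rfl
  | cons p rest ih =>
    have hunfold : pvALoop (p :: rest) =
        (if (decide (PySem.Str.len p > 2) || decide (PySem.Str.len p < 1)) = true then false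
         else if (!(p.toList.all fun c => pvHexdigits.contains c)) = true then false
         else pvALoop rest) := rfl
    rw [hunfold, List.all_cons]
    by_cases hlen : 1 ≤ p.toList.length ∧ p.toList.length ≤ 2
    · have hcond : (decide (PySem.Str.len p > 2) || decide (PySem.Str.len p < 1)) = false := by
        rw [PySem.Str.len_eq]
        simp only [Bool.or_eq_false_iff, decide_eq_false_iff_not, not_lt]
        omega
      rw [hcond, if_neg (by simp)]
      cases hb : (p.toList.all fun c => pvHexdigits.contains c) with
      | false =>
        rw [if_pos (show (!false) = true from rfl)]
        have hok : pvOk p.toList = false := by rw [pvOk, hb, Bool.and_false]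
        rw [hok, Bool.false_and]
      | true =>
        rw [if_neg (by simp)]
        have hok : pvOk p.toList = true := by
          rw [pvOk, hb, Bool.and_true, Bool.and_eq_true, decide_eq_true_eq, decide_eq_true_eq]
          exact hlen
        rw [hok, Bool.true_and, ih]
    · have hcond : (decide (PySem.Str.len p > 2) || decide (PySem.Str.len p < 1)) = true := by
        rw [PySem.Str.len_eq]
        simp only [Bool.or_eq_true, decide_eq_true_eq]
        omega
      rw [hcond, if_pos rfl]
      have hok : pvOk p.toList = false := by
        apply Bool.eq_false_iff.mpr
        intro hcontra
        rw [pvOk, Bool.and_eq_true, Bool.and_eq_true, decide_eq_true_eq, decide_eq_true_eq]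
          at hcontra
        exact hlen ⟨hcontra.1.1, hcontra.1.2⟩
      rw [hok, Bool.false_and]

-- the current-group check with `run` hex chars already consumed
def pvFirstOk (r : Nat) (p : List Char) : Bool :=
  decide (1 ≤ r + p.length) && decide (r + p.length ≤ 2) && p.all (fun c => pvHexdigits.contains c)

lemma firstOk_zero (p : List Char) : pvFirstOk 0 p = pvOk p := by
  rw [pvFirstOk, pvOk, Bool.eq_iff_iff]
  simp only [Bool.and_eq_true, decide_eq_true_eq]
  constructor <;> rintro ⟨⟨h1, h2⟩, h3⟩ <;> exact ⟨⟨by omega, by omega⟩, h3⟩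

lemma bLoop_eq : ∀ (l : List Char) (g r : Nat), r ≤ 2 →
    pvBLoop l g r =
      ((g + (pvSplit l).tail.length == 8) && pvFirstOk r (pvSplit l).headI
        && (pvSplit l).tail.all pvOk) := by
  intro l
  induction l with
  | nil =>
    intro g r hr
    have hsp : pvSplit [] = [[]] := rfl
    rw [hsp]
    have hunfold : pvBLoop [] g r = (g == 8 && decide (1 ≤ r)) := rfl
    rw [hunfold]
    simp only [pvHeadI_cons, List.tail_cons, List.length_nil, Nat.add_zero, List.all_nil,
      Bool.and_true, pvFirstOk]
    rw [Bool.eq_iff_iff]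
    simp only [Bool.and_eq_true, decide_eq_true_eq, beq_iff_eq]
    omega
  | cons c cs ih =>
    intro g r hr
    obtain ⟨p0, rest, hpr⟩ := pvSplit_exists_cons cs
    have hunfold : pvBLoop (c :: cs) g r =
        (if c = ':' then (if r = 0 then false else pvBLoop cs (g + 1) 0)
         else if pvHexdigits.contains c = true then
           (if r + 1 > 2 then false else pvBLoop cs g (r + 1))
         else false) := rfl
    have hsp : pvSplit (c :: cs) = (if c = ':' then [] :: pvSplit cs
               else (c :: (pvSplit cs).headI) :: (pvSplit cs).tail) := rfl
    rw [hunfold, hsp]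
    by_cases hc : c = ':'
    · rw [if_pos hc, if_pos hc]
      simp only [pvHeadI_cons, List.tail_cons]
      by_cases hr0 : r = 0
      · rw [if_pos hr0]
        have hf : pvFirstOk r [] = false := by
          rw [pvFirstOk]
          subst hr0
          rfl
        rw [hf, Bool.and_false, Bool.false_and]
      · rw [if_neg hr0, ih (g + 1) 0 (by omega)]
        have hf : pvFirstOk r [] = true := by
          rw [pvFirstOk]
          simp only [List.length_nil, Nat.add_zero, List.all_nil, Bool.and_true,
            Bool.and_eq_true, decide_eq_true_eq]
          omega
        rw [hf, Bool.and_true, hpr]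
        simp only [pvHeadI_cons, List.tail_cons, List.length_cons, List.all_cons, firstOk_zero]
        rw [show g + 1 + rest.length = g + (rest.length + 1) from by omega, Bool.and_assoc]
    · rw [if_neg hc, if_neg hc]
      simp only [pvHeadI_cons, List.tail_cons]
      by_cases hhex : pvHexdigits.contains c = true
      · rw [if_pos hhex]
        by_cases hbig : r + 1 > 2
        · rw [if_pos hbig]
          have hf : pvFirstOk r (c :: (pvSplit cs).headI) = false := by
            apply Bool.eq_false_iff.mpr
            intro hcontra
            rw [pvFirstOk, Bool.and_eq_true, Bool.and_eq_true, decide_eq_true_eq,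
              decide_eq_true_eq, List.length_cons] at hcontra
            omega
          rw [hf, Bool.and_false, Bool.false_and]
        · rw [if_neg hbig, ih g (r + 1) (by omega), hpr]
          simp only [pvHeadI_cons, List.tail_cons]
          have hf : pvFirstOk r (c :: p0) = pvFirstOk (r + 1) p0 := by
            rw [pvFirstOk, pvFirstOk, List.all_cons, hhex, Bool.true_and, List.length_cons,
              Bool.eq_iff_iff]
            simp only [Bool.and_eq_true, decide_eq_true_eq]
            constructor <;> rintro ⟨⟨h1, h2⟩, h3⟩ <;> exact ⟨⟨by omega, by omega⟩, h3⟩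
          rw [hf]
      · rw [if_neg hhex]
        have hf : pvFirstOk r (c :: (pvSplit cs).headI) = false := by
          rw [pvFirstOk, List.all_cons]
          rw [Bool.not_eq_true] at hhex
          rw [hhex, Bool.false_and, Bool.and_false]
        rw [hf, Bool.and_false, Bool.false_and]

lemma split_parts (pwwn : String) :
    ∃ parts, PySem.Str.split? pwwn ":" = some parts ∧
      parts.map String.toList = pvSplit pwwn.toList := by
  have h := PySem.Str.split?_map pwwn ":"
  have hsep : (":" : String).toList = [':'] := rfl
  rw [hsep, PySem.Chars.split?] at h
  simp only [List.isEmpty_cons, Bool.false_eq_true, if_false] at h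
  rw [splitOn_eq] at h
  cases hs : PySem.Str.split? pwwn ":" with
  | none => rw [hs] at h; simp at h
  | some parts =>
    rw [hs] at h
    simp only [Option.map_some, Option.some.injEq] at h
    exact ⟨parts, rfl, h⟩

-- ===== VERDICT (by name: the statement is the Claim_ definition above) =====
theorem isPwwnValid_spec : Claim_equal_isPwwnValid := by
  intro pwwn _
  unfold Spec_isPwwnValid
  obtain ⟨parts, hs, hmap⟩ := split_parts pwwn
  obtain ⟨p0, rest, hpr⟩ := pvSplit_exists_cons pwwn.toList
  have hA : isPwwnValid pwwn = (if parts.length ≠ 8 then false else pvALoop parts) := by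
    unfold isPwwnValid
    rw [hs]
  have hplen : parts.length = rest.length + 1 := by
    have h := congrArg List.length hmap
    rw [List.length_map, hpr, List.length_cons] at h
    exact h
  have hall : (parts.all fun p => pvOk p.toList) = (pvOk p0 && rest.all pvOk) := by
    have h := congrArg (fun l => List.all l pvOk) hmap
    simp only [List.all_map, hpr, List.all_cons] at h
    exact h
  have hB : isPwwnValid_alt pwwn =
      ((1 + rest.length == 8) && pvOk p0 && rest.all pvOk) := by
    unfold isPwwnValid_alt
    rw [bLoop_eq _ 1 0 (by omega), hpr]
    simp only [pvHeadI_cons, List.tail_cons, firstOk_zero]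
  rw [hA, hB, aLoop_eq, hall]
  by_cases h8 : parts.length = 8
  · rw [if_neg (not_not_intro h8)]
    rw [show (1 + rest.length == 8) = true from by
      rw [show 1 + rest.length = 8 from by omega]
      rfl]
    rw [Bool.true_and]
  · rw [if_pos h8]
    rw [show (1 + rest.length == 8) = false from by
      apply Bool.eq_false_iff.mpr
      simp only [ne_eq, beq_iff_eq]
      omega]
    rw [Bool.false_and, Bool.false_and]
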